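-- pv_equiv track=rewrite | github.com/phildavis17/wordleologist | wordleologist.py | _filter_by_inlcuded
-- ===== SOURCE A (Python) =====
-- def _filter_by_inlcuded(included: set, words: set) -> set:
--     """Returns the supplied set of words stripped of all words that do not contain letters that must appear in the target word."""
--     bad_words = set()
--     for char in included:
--         for word in words:
--             if char not in word:
--                 bad_words.add(word)
--         words = words.difference(bad_words)
--         bad_words = set()
--     return words
-- ===== SOURCE B (Python) =====
-- def _filter_by_inlcuded(included: set, words: set) -> set:
--     """Returns the supplied set of words stripped of all words that do not contain letters that must appear in the target word."""
--     return {w for w in words if all(c in w for c in included)}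
-- ===== Notes on version B (the rewrite author's own statement) =====
-- stated objective: simpler
-- what changed: B is a single filtering pass over the words (keep w iff every included letter occurs in w), replacing A's loop over included letters that on each round scans all remaining words, accumulates a bad_words set and rebuilds the word set by set-difference.
import Mathlib
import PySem

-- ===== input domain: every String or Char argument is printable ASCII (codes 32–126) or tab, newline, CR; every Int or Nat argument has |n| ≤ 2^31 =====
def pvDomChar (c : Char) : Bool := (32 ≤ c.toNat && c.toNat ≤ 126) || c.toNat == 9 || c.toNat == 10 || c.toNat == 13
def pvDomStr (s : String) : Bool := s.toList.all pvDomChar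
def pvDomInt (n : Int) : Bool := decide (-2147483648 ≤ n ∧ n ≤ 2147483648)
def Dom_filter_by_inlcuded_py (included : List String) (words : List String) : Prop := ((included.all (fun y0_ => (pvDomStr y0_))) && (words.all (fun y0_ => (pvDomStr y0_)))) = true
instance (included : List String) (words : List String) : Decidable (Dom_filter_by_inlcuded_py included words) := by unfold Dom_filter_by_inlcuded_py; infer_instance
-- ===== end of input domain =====

-- B replaces A's per-letter word-set rebuild (bad_words accumulator + set difference per included letter) by one filtering pass keeping each word iff it contains every included letter; objective: simpler.
-- ===== PORT A =====
-- A: for each included letter, collect into bad_words the words not containing it,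
-- then replace words by words.difference(bad_words).
def filter_by_inlcuded_py (included : List String) (words : List String) : List String :=
  included.foldl (fun ws char =>
    let bad_words := ws.foldl (fun bw word =>
      if !(PySem.Str.isIn char word) then PySem.Set.add bw word else bw) PySem.Set.empty
    PySem.Set.diff ws bad_words) words

-- ===== PORT B =====
-- B: one pass keeping each word iff it contains every included letter.
def filter_by_inlcuded_py_alt (included : List String) (words : List String) : List String :=
  words.filter (fun w => included.all (fun c => PySem.Str.isIn c w))

-- ===== PRECONDITION & SPEC =====
def Spec_filter_by_inlcuded_py (included : List String) (words : List String) (out : List String) : Prop := out = filter_by_inlcuded_py_alt included words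
instance (included : List String) (words : List String) (out : List String) : Decidable (Spec_filter_by_inlcuded_py included words out) := by unfold Spec_filter_by_inlcuded_py; infer_instance

-- ===== CLAIM (what is proved, stated in full; the proofs are below) =====
def Claim_equal_filter_by_inlcuded_py : Prop := ∀ (included : List String) (words : List String), Dom_filter_by_inlcuded_py included words → Spec_filter_by_inlcuded_py included words (filter_by_inlcuded_py included words)

-- ===== LEMMAS AND PROOFS =====

-- membership in the bad_words accumulator
theorem mem_bad_foldl (char : String) (ws : List String) (bw : List String) (w : String) :
    w ∈ ws.foldl (fun bw word =>
      if !(PySem.Str.isIn char word) then PySem.Set.add bw word else bw) bw ↔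
    w ∈ bw ∨ (w ∈ ws ∧ PySem.Str.isIn char w = false) := by
  induction ws generalizing bw with
  | nil => simp
  | cons x xs ih =>
    simp only [List.foldl_cons]
    by_cases h : PySem.Str.isIn char x = true
    · rw [if_neg (by rw [h]; decide), ih]
      constructor
      · rintro (hb | ⟨hx, hc⟩)
        · exact Or.inl hb
        · exact Or.inr ⟨List.mem_cons_of_mem _ hx, hc⟩
      · rintro (hb | ⟨hx, hc⟩)
        · exact Or.inl hb
        · rcases List.mem_cons.mp hx with rfl | hx'
          · rw [h] at hc; cases hc
          · exact Or.inr ⟨hx', hc⟩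
    · have h' : PySem.Str.isIn char x = false := by
        cases hv : PySem.Str.isIn char x
        · rfl
        · exact absurd hv h
      rw [if_pos (by rw [h']; decide), ih]
      constructor
      · rintro (hb | ⟨hx, hc⟩)
        · rcases (PySem.Set.mem_add _ _ _).mp hb with hb' | rfl
          · exact Or.inl hb'
          · exact Or.inr ⟨List.mem_cons_self, h'⟩
        · exact Or.inr ⟨List.mem_cons_of_mem _ hx, hc⟩
      · rintro (hb | ⟨hx, hc⟩)
        · exact Or.inl ((PySem.Set.mem_add _ _ _).mpr (Or.inl hb))
        · rcases List.mem_cons.mp hx with rfl | hx'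
          · exact Or.inl ((PySem.Set.mem_add _ _ _).mpr (Or.inr rfl))
          · exact Or.inr ⟨hx', hc⟩

-- one round of A's loop is a filter by the current letter
theorem step_eq_filter (char : String) (ws : List String) :
    PySem.Set.diff ws
      (ws.foldl (fun bw word =>
        if !(PySem.Str.isIn char word) then PySem.Set.add bw word else bw) PySem.Set.empty)
    = ws.filter (fun w => PySem.Str.isIn char w) := by
  unfold PySem.Set.diff
  apply List.filter_congr
  intro w hw
  have hmem := mem_bad_foldl char ws PySem.Set.empty w
  simp only [PySem.Set.empty, List.not_mem_nil, false_or] at hmem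
  rw [PySem.Set.contains_eq_listContains]
  simp only [List.contains_eq_mem, PySem.Set.empty]
  cases h : PySem.Str.isIn char w with
  | true =>
    have hnot : w ∉ ws.foldl (fun bw word =>
        if !(PySem.Str.isIn char word) then PySem.Set.add bw word else bw) [] := by
      intro hm
      have := (hmem.mp hm).2
      rw [h] at this
      cases this
    rw [decide_eq_false hnot]
    rfl
  | false =>
    have hin : w ∈ ws.foldl (fun bw word =>
        if !(PySem.Str.isIn char word) then PySem.Set.add bw word else bw) [] :=
      hmem.mpr ⟨hw, h⟩
    rw [decide_eq_true hin]
    rfl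

theorem foldl_filter (included : List String) (ws : List String) :
    included.foldl (fun ws char =>
      let bad_words := ws.foldl (fun bw word =>
        if !(PySem.Str.isIn char word) then PySem.Set.add bw word else bw) PySem.Set.empty
      PySem.Set.diff ws bad_words) ws
    = ws.filter (fun w => included.all (fun c => PySem.Str.isIn c w)) := by
  induction included generalizing ws with
  | nil => simp
  | cons c cs ih =>
    simp only [List.foldl_cons]
    rw [step_eq_filter, ih, List.filter_filter]
    simp [List.all_cons, Bool.and_comm]

-- ===== VERDICT (by name: the statement is the Claim_ definition above) =====
theorem filter_by_inlcuded_py_spec : Claim_equal_filter_by_inlcuded_py := by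
  intro included words _
  show filter_by_inlcuded_py included words = filter_by_inlcuded_py_alt included words
  unfold filter_by_inlcuded_py filter_by_inlcuded_py_alt
  exact foldl_filter included words
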